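-- pv_equiv track=rewrite | github.com/DavidovaNikola/PythonHomework | bigram_utils.py | create_caesar_key
-- ===== SOURCE A (Python) =====
-- def create_caesar_key(shift=3):
--     """
--     Create a substitution key based on Caesar cipher shift.
--
--     Args:
--         shift (int): Number of positions to shift (default: 3)
--
--     Returns:
--         str: A substitution key representing a Caesar cipher
--     """
--     alphabet = 'ABCDEFGHIJKLMNOPQRSTUVWXYZ_'
--     shifted_key = ''
--
--     for char in alphabet:
--         # Find the position of the character
--         pos = alphabet.index(char)
--         # Shift by the specified amount (with wraparound)
--         new_pos = (pos + shift) % len(alphabet)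
--         shifted_key += alphabet[new_pos]
--
--     return shifted_key
-- ===== SOURCE B (Python) =====
-- def create_caesar_key(shift=3):
--     """Caesar key as a closed-form rotation: alphabet[k:] + alphabet[:k]."""
--     alphabet = 'ABCDEFGHIJKLMNOPQRSTUVWXYZ_'
--     k = shift % len(alphabet)
--     return alphabet[k:] + alphabet[:k]
-- ===== Notes on version B (the rewrite author's own statement) =====
-- stated objective: simpler
-- what changed: Replaces the per-character loop with its .index lookup and modular indexing by a single closed-form rotation alphabet[k:] + alphabet[:k] with k = shift % 27.
import Mathlib
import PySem

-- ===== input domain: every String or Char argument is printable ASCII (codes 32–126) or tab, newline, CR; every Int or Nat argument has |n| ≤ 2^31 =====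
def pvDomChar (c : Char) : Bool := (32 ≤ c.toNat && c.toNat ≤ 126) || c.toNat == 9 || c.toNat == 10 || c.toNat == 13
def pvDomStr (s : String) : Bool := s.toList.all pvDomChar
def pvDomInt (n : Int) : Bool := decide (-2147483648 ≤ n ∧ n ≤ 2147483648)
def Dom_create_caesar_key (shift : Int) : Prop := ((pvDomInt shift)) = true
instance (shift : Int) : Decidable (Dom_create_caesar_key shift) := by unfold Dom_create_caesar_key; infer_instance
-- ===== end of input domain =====

-- B replaces A's per-character loop (.index + modular indexing) by the closed-form
-- rotation alphabet[k:] + alphabet[:k] with k = shift % 27; objective: simpler.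

-- ===== PORT A =====
def pvAlpha : List Char := "ABCDEFGHIJKLMNOPQRSTUVWXYZ_".toList

def create_caesar_key (shift : Int) : String :=
  -- for char in alphabet: pos = alphabet.index(char); new_pos = (pos+shift) % len; key += alphabet[new_pos]
  String.mk (pvAlpha.foldl (fun acc c =>
    let pos : Int := ((PySem.List.index? pvAlpha c).getD 0 : Nat)
    -- alphabet.index(char) always succeeds here (char ∈ alphabet), so getD's default is unreachable
    let newPos : Int := PySem.Int.mod (pos + shift) (pvAlpha.length : Int)
    acc ++ [PySem.List.pyGetD pvAlpha newPos 'A']) [])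
    -- alphabet[new_pos] with 0 ≤ new_pos < 27: always in range, default unreachable

-- ===== PORT B =====
def create_caesar_key_alt (shift : Int) : String :=
  let k : Int := PySem.Int.mod shift (pvAlpha.length : Int)
  String.mk (PySem.List.slice pvAlpha (some k) none ++ PySem.List.slice pvAlpha none (some k))

-- ===== PRECONDITION & SPEC =====
def Spec_create_caesar_key (shift : Int) (out : String) : Prop := out = create_caesar_key_alt shift
instance (shift : Int) (out : String) : Decidable (Spec_create_caesar_key shift out) := by unfold Spec_create_caesar_key; infer_instance

-- ===== CLAIM (what is proved, stated in full; the proofs are below) =====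
def Claim_equal_create_caesar_key : Prop := ∀ (shift : Int), Dom_create_caesar_key shift → Spec_create_caesar_key shift (create_caesar_key shift)

-- ===== LEMMAS AND PROOFS =====

-- A's result depends on shift only through shift % 27
lemma create_caesar_key_congr (s1 s2 : Int)
    (h : PySem.Int.mod s1 27 = PySem.Int.mod s2 27) :
    create_caesar_key s1 = create_caesar_key s2 := by
  have hm : ∀ p : Int, PySem.Int.mod (p + s1) ((pvAlpha.length : Int)) = PySem.Int.mod (p + s2) ((pvAlpha.length : Int)) := by
    intro p
    have hlen : ((pvAlpha.length : Int)) = 27 := rfl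
    rw [hlen,
        PySem.Int.mod_eq_emod_of_pos (by norm_num : (0:Int) < 27),
        PySem.Int.mod_eq_emod_of_pos (by norm_num : (0:Int) < 27)]
    rw [PySem.Int.mod_eq_emod_of_pos (by norm_num : (0:Int) < 27),
        PySem.Int.mod_eq_emod_of_pos (by norm_num : (0:Int) < 27)] at h
    omega
  unfold create_caesar_key
  refine congrArg String.mk ?_
  apply PySem.List.foldl_congr_mem
  intro acc c _
  simp only [hm]

-- B's result depends on shift only through shift % 27 (it uses nothing else)
lemma create_caesar_key_alt_congr (s1 s2 : Int)
    (h : PySem.Int.mod s1 27 = PySem.Int.mod s2 27) :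
    create_caesar_key_alt s1 = create_caesar_key_alt s2 := by
  unfold create_caesar_key_alt
  have hlen : ((pvAlpha.length : Int)) = 27 := rfl
  rw [hlen, h]

lemma create_caesar_key_eq_alt_of_lt (k : Int) (h0 : 0 ≤ k) (h1 : k < 27) :
    create_caesar_key k = create_caesar_key_alt k := by
  interval_cases k <;> decide

-- ===== VERDICT (by name: the statement is the Claim_ definition above) =====
theorem create_caesar_key_spec : Claim_equal_create_caesar_key := by
  intro shift _
  unfold Spec_create_caesar_key
  set k : Int := PySem.Int.mod shift 27 with hk
  have hkk : PySem.Int.mod k 27 = PySem.Int.mod shift 27 := by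
    rw [hk, PySem.Int.mod_eq_emod_of_pos (by norm_num : (0:Int) < 27),
        PySem.Int.mod_eq_emod_of_pos (by norm_num : (0:Int) < 27)]
    omega
  rw [create_caesar_key_congr shift k hkk.symm,
      create_caesar_key_alt_congr shift k hkk.symm]
  exact create_caesar_key_eq_alt_of_lt k
    (PySem.Int.mod_nonneg _ (by norm_num)) (PySem.Int.mod_lt _ (by norm_num))
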